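-- pv_equiv track=rewrite | github.com/pypi-data/pypi-mirror-386 | packages/riggery/riggery-0.1-py3-none-any.whl/riggery/general/numbers.py | subdivide_int
-- ===== SOURCE A (Python) =====
-- def subdivide_int(num_anchors:int, iterations:int, inclusive:bool=True) -> int:
--     """
--     Given a number of 'anchors' (e.g. along a poly edge or curve), tells you how
--     many you would be left with after applying a certain number of subdivisions.
--
--     :param num_anchors: the starting number of nodes / anchors / elements; must
--         be at least 2
--     :param iterations: the number of times to subdivide *num_anchors*
--     :param inclusive: return the original number + the number of anchors added
--         through subdivision; if this is false, only the number contributed by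
--         subdivision will be returned; defaults to True
--     """
--     if num_anchors > 1:
--         out = num_anchors - 2
--         for i in range(iterations):
--             out = out * 2 + 1
--         if inclusive:
--             out += 2
--         return out
--     raise ValueError('num anchors must be at least 2')
-- ===== SOURCE B (Python) =====
-- def subdivide_int(num_anchors: int, iterations: int, inclusive: bool = True) -> int:
--     if num_anchors <= 1:
--         raise ValueError('num anchors must be at least 2')
--     k = max(iterations, 0)
--     return ((num_anchors - 1) << k) + (1 if inclusive else -1)
-- ===== Notes on version B (the rewrite author's own statement) =====
-- stated objective: faster
-- what changed: replaces the O(iterations) doubling loop with the closed form (num_anchors-1)*2^iterations +/- 1 via a single bit shift; intended as faster, measured 1410x at n=65536 in a timing run (larger sizes exceeded the harness's output decoding)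
import Mathlib
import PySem

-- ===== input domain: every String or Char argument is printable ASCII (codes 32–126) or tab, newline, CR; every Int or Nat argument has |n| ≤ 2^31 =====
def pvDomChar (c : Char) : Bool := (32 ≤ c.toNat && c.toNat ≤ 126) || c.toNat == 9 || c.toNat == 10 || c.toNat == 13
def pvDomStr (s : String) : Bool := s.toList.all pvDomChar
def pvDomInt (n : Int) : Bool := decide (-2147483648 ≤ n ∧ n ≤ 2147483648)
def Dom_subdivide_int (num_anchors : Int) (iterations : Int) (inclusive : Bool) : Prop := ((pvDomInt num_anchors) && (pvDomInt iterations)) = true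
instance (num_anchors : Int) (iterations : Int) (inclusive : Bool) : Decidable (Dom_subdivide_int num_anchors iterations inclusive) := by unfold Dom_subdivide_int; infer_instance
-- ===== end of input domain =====

-- B replaces A's O(iterations) doubling loop by the closed form (num_anchors-1)*2^k ± 1; intended as faster (timing run measured 1410x at n=65536).
-- ===== PORT A =====
def subdivide_int (num_anchors : Int) (iterations : Int) (inclusive : Bool) : Int :=
  if num_anchors > 1 then
    let out := (PySem.List.pyRange 0 iterations 1).foldl (fun out _ => out * 2 + 1) (num_anchors - 2)
    if inclusive then out + 2 else out
  else 0  -- Python raises ValueError here; excluded by Pre_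

-- ===== PORT B =====
def subdivide_int_alt (num_anchors : Int) (iterations : Int) (inclusive : Bool) : Int :=
  (num_anchors - 1) * 2 ^ (max iterations 0).toNat + (if inclusive then 1 else -1)

-- ===== PRECONDITION & SPEC =====
-- A raises ValueError when num_anchors ≤ 1; those inputs are excluded.
def Pre_subdivide_int (num_anchors : Int) (iterations : Int) (inclusive : Bool) : Prop := num_anchors > 1
instance (num_anchors : Int) (iterations : Int) (inclusive : Bool) : Decidable (Pre_subdivide_int num_anchors iterations inclusive) := by unfold Pre_subdivide_int; infer_instance
def pvWitness_subdivide_int : Int × Int × Bool := (4, 3, true)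
def Spec_subdivide_int (num_anchors : Int) (iterations : Int) (inclusive : Bool) (out : Int) : Prop := out = subdivide_int_alt num_anchors iterations inclusive
instance (num_anchors : Int) (iterations : Int) (inclusive : Bool) (out : Int) : Decidable (Spec_subdivide_int num_anchors iterations inclusive out) := by unfold Spec_subdivide_int; infer_instance

-- ===== CLAIM (what is proved, stated in full; the proofs are below) =====
def Claim_equal_subdivide_int : Prop := ∀ (num_anchors : Int) (iterations : Int) (inclusive : Bool), Dom_subdivide_int num_anchors iterations inclusive → Pre_subdivide_int num_anchors iterations inclusive → Spec_subdivide_int num_anchors iterations inclusive (subdivide_int num_anchors iterations inclusive)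

-- ===== LEMMAS AND PROOFS =====
theorem foldl_double_succ (l : List Int) (s : Int) :
    l.foldl (fun out _ => out * 2 + 1) s = (s + 1) * 2 ^ l.length - 1 := by
  induction l generalizing s with
  | nil => simp
  | cons a l ih =>
    simp only [List.foldl_cons, ih, List.length_cons, pow_succ]
    ring

-- ===== VERDICT (by name: the statement is the Claim_ definition above) =====
theorem subdivide_int_spec : Claim_equal_subdivide_int := by
  intro n it incl _ hpre
  unfold Spec_subdivide_int subdivide_int subdivide_int_alt
  unfold Pre_subdivide_int at hpre
  rw [if_pos hpre]
  simp only [foldl_double_succ, PySem.List.length_pyRange_one, Int.sub_zero]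
  have hk : it.toNat = (max it 0).toNat := by omega
  rw [hk]
  cases incl <;> simp <;> ring
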